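-- pv_equiv track=rewrite | github.com/BekK2820/python-tasks | task1/1.py | circular_array_path
-- ===== SOURCE A (Python) =====
-- def circular_array_path(n, m):
--
--     circular_array = list(range(1, n + 1))
--     path = []
--
--
--     current_index = 0
--
--     while True:
--
--         start_element = circular_array[current_index]
--         path.append(start_element)
--
--
--         current_index = (current_index + m) % n
--
--
--         if current_index == 0:
--             break
--
--     return ''.join(map(str, path))
-- ===== SOURCE B (Python) =====
-- def circular_array_path(n, m):
--     def gcd(a, b):
--         a, b = abs(a), abs(b)
--         while b:
--             a, b = b, a % b
--         return a
--
--     circular_array = list(range(1, n + 1))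
--     count = n // gcd(n, m)
--     return ''.join(str(circular_array[(i * m) % n]) for i in range(count))
-- ===== Notes on version B (the rewrite author's own statement) =====
-- stated objective: alternative
-- what changed: Replaces the stateful while-True walk with an early break by computing the number of visited elements up front as n // gcd(n, m) and producing each visited index directly as (i*m) % n in a single bounded comprehension.
import Mathlib
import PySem

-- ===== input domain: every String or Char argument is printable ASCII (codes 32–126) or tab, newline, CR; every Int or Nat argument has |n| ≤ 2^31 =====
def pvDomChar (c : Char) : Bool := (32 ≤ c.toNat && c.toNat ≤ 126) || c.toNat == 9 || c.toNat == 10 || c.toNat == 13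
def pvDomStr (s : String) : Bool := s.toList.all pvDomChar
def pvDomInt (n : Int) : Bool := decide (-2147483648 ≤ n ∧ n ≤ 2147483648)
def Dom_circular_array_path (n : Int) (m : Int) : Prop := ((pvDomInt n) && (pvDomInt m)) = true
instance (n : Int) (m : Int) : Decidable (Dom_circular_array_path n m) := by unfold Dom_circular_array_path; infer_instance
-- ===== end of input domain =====

-- B replaces A's stateful while-True walk (break when the index returns to 0) by computing the
-- visit count n // gcd(n, m) up front and generating each visited index directly as (i*m) % n.

-- ===== PORT A =====
-- the while-True loop; fuel bounds the iterations (n iterations always suffice within Pre_);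
-- the `none` branch of pyGet? is Python's IndexError (excluded by Pre_)
def pathLoopA (arr : List Int) (n : Int) (m : Int) : Nat → Int → List Int → List Int
  | 0, _, path => path.reverse
  | Nat.succ f, idx, path =>
    match PySem.List.pyGet? arr idx with
    | none => path.reverse
    | some x =>
      let idx' := PySem.Int.mod (idx + m) n
      if idx' = 0 then (x :: path).reverse
      else pathLoopA arr n m f idx' (x :: path)

def circular_array_path (n : Int) (m : Int) : String :=
  let arr := PySem.List.pyRange 1 (n + 1) 1
  PySem.Str.join "" ((pathLoopA arr n m n.natAbs 0 []).map PySem.Int.toStr)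

-- ===== PORT B =====
-- Source B's hand-written `gcd` is Euclid's algorithm on absolute values, i.e. exactly Int.gcd
def circular_array_path_alt (n : Int) (m : Int) : String :=
  let arr := PySem.List.pyRange 1 (n + 1) 1
  let count := PySem.Int.floordiv n (Int.gcd n m : Int)
  PySem.Str.join ""
    ((PySem.List.pyRange 0 count 1).map
      (fun i => PySem.Int.toStr (PySem.List.pyGetD arr (PySem.Int.mod (i * m) n) 0)))

-- ===== PRECONDITION & SPEC =====
-- A raises IndexError (empty circular array) for every n ≤ 0; Pre_ excludes exactly those inputs.
def Pre_circular_array_path (n : Int) (m : Int) : Prop := 1 ≤ n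
instance (n : Int) (m : Int) : Decidable (Pre_circular_array_path n m) := by unfold Pre_circular_array_path; infer_instance
def pvWitness_circular_array_path : Int × Int := (6, 4)

def Spec_circular_array_path (n : Int) (m : Int) (out : String) : Prop := out = circular_array_path_alt n m
instance (n : Int) (m : Int) (out : String) : Decidable (Spec_circular_array_path n m out) := by unfold Spec_circular_array_path; infer_instance

-- ===== CLAIM (what is proved, stated in full; the proofs are below) =====
def Claim_equal_circular_array_path : Prop := ∀ (n : Int) (m : Int), Dom_circular_array_path n m → Pre_circular_array_path n m → Spec_circular_array_path n m (circular_array_path n m)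

-- ===== LEMMAS AND PROOFS =====

-- n ∣ k*m  ↔  (n / gcd n m) ∣ k   (for 0 < n)
lemma dvd_mul_iff_div_gcd_dvd (n m k : Int) (hn : 0 < n) :
    n ∣ k * m ↔ (n / (Int.gcd n m : Int)) ∣ k := by
  set g : Int := (Int.gcd n m : Int) with hg
  have hgpos : (0 : Int) < g := by
    rw [hg]; exact_mod_cast Int.gcd_pos_iff.mpr (Or.inl hn.ne')
  obtain ⟨c, hcn⟩ : g ∣ n := hg ▸ Int.gcd_dvd_left n m
  obtain ⟨m', hm⟩ : g ∣ m := hg ▸ Int.gcd_dvd_right n m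
  have hc : n / g = c := by rw [hcn]; exact Int.mul_ediv_cancel_left _ hgpos.ne'
  have hm' : m / g = m' := by rw [hm]; exact Int.mul_ediv_cancel_left _ hgpos.ne'
  have hcop : IsCoprime c m' := by
    apply Int.isCoprime_iff_gcd_eq_one.mpr
    have h1 := Int.gcd_div_gcd_div_gcd (i := n) (j := m)
      (Int.gcd_pos_iff.mpr (Or.inl hn.ne'))
    rw [← hg, hc, hm'] at h1
    exact h1
  rw [hc]
  constructor
  · intro h
    rw [hcn, hm] at h
    rw [show k * (g * m') = g * (k * m') by ring] at h
    exact hcop.dvd_of_dvd_mul_right ((mul_dvd_mul_iff_left hgpos.ne').mp h)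
  · rintro ⟨t, ht⟩
    refine ⟨t * m', ?_⟩
    rw [hcn, hm, ht]; ring

-- the loop invariant: starting at index (i*m) % n with enough fuel, the loop appends exactly
-- the elements at indices (j*m) % n for j = i, …, c-1, where c = n / gcd n m
lemma pathLoopA_spec (n m : Int) (hn : 1 ≤ n) (c : Int)
    (hc : c = n / (Int.gcd n m : Int)) :
    ∀ (f : Nat) (i : Int) (path : List Int), 0 ≤ i → i < c → (c - i).toNat ≤ f →
      pathLoopA (PySem.List.pyRange 1 (n + 1) 1) n m f (PySem.Int.mod (i * m) n) path
        = path.reverse ++ (PySem.List.pyRange i c 1).map (fun j => PySem.Int.mod (j * m) n + 1) := by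
  have hn' : (0 : Int) < n := by omega
  have hkey : ∀ k : Int, PySem.Int.mod (k * m) n = 0 ↔ c ∣ k := by
    intro k
    rw [PySem.Int.mod_eq_zero_iff_dvd, hc]
    exact dvd_mul_iff_div_gcd_dvd n m k hn'
  have hstep : ∀ i : Int,
      PySem.Int.mod (PySem.Int.mod (i * m) n + m) n = PySem.Int.mod ((i + 1) * m) n := by
    intro i
    rw [PySem.Int.mod_eq_emod_of_pos hn', PySem.Int.mod_eq_emod_of_pos hn',
        PySem.Int.mod_eq_emod_of_pos hn', Int.emod_add_emod]
    ring_nf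
  have hget : ∀ i : Int,
      PySem.List.pyGet? (PySem.List.pyRange 1 (n + 1) 1) (PySem.Int.mod (i * m) n)
        = some (PySem.Int.mod (i * m) n + 1) := by
    intro i
    have h0 := PySem.Int.mod_nonneg (i * m) hn'
    have hlt := PySem.Int.mod_lt (i * m) hn'
    rw [PySem.List.pyGet?_of_nonneg _ h0, PySem.List.getElem?_pyRange_one,
        if_pos (by omega)]
    congr 1
    omega
  intro f
  induction f with
  | zero => intro i path h0 hic hf; omega
  | succ f ih =>
    intro i path h0 hic hf
    simp only [pathLoopA, hget i, hstep i]
    by_cases hz : PySem.Int.mod ((i + 1) * m) n = 0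
    · have hdvd : c ∣ i + 1 := (hkey _).mp hz
      have hi1 : i + 1 = c := by
        have := Int.le_of_dvd (by omega) hdvd
        omega
      rw [if_pos hz, ← hi1, PySem.List.pyRange_one_singleton]
      simp
    · have hi1 : i + 1 < c := by
        rcases lt_or_eq_of_le (by omega : i + 1 ≤ c) with h | h
        · exact h
        · exact absurd ((hkey _).mpr (h ▸ dvd_refl c)) hz
      rw [if_neg hz, ih (i + 1) _ (by omega) hi1 (by omega),
          PySem.List.pyRange_one_cons hic]
      simp

-- ===== VERDICT (by name: the statement is the Claim_ definition above) =====
theorem circular_array_path_spec : Claim_equal_circular_array_path := by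
  intro n m _ hpre
  unfold Pre_circular_array_path at hpre
  unfold Spec_circular_array_path
  simp only [circular_array_path, circular_array_path_alt]
  have hn' : (0 : Int) < n := by omega
  have hgpos : (0 : Int) < (Int.gcd n m : Int) := by
    exact_mod_cast Int.gcd_pos_iff.mpr (Or.inl hn'.ne')
  set c : Int := n / (Int.gcd n m : Int) with hc
  have hcpos : 0 < c :=
    Int.ediv_pos_of_pos_of_dvd hn' hgpos.le (Int.gcd_dvd_left n m)
  have hcle : c ≤ n := Int.ediv_le_self _ (by omega)
  have h0 : PySem.Int.mod ((0 : Int) * m) n = 0 := by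
    rw [PySem.Int.mod_eq_emod_of_pos hn']; simp
  have hA := pathLoopA_spec n m hpre c hc n.natAbs 0 [] le_rfl hcpos (by omega)
  rw [h0] at hA
  rw [hA, PySem.Int.floordiv_eq_ediv_of_pos hgpos, ← hc]
  simp only [List.reverse_nil, List.nil_append, List.map_map]
  congr 1
  apply List.map_congr_left
  intro i hi
  have hib := PySem.List.mem_pyRange_one.mp hi
  have him0 := PySem.Int.mod_nonneg (i * m) hn'
  have himlt := PySem.Int.mod_lt (i * m) hn'
  simp only [Function.comp]
  congr 1
  rw [PySem.List.pyGetD_of_nonneg _ _ him0]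
  rw [List.getD_eq_getElem?_getD, PySem.List.getElem?_pyRange_one, if_pos (by omega)]
  simp only [Option.getD_some]
  omega
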